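-- pv_equiv track=rewrite | github.com/pypi-data/pypi-mirror-42 | packages/joho/joho-0.19.3.tar.gz/joho-0.19.3/joho/joho.py | RemoveCommonIndent
-- ===== SOURCE A (Python) =====
-- SPACE =" "
--
-- EOL = "\n"
--
-- def RemoveCommonIndent(S):
--     """
--     Only works for soft indent !
--     if S =  "   aa"+\
--             "   bb"
--
--     return S = "aa"+\
--                "bb"
--     """
--     NumberOfSpace = 0
--     if S[0] != SPACE:
--         return S
--     while S[NumberOfSpace] == SPACE:
--         NumberOfSpace += 1
--     S = S[NumberOfSpace:] # get rid of the first indent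
--     S = S.replace(EOL + NumberOfSpace*SPACE, EOL)
--     return S
-- ===== SOURCE B (Python) =====
-- SPACE = " "
-- EOL = "\n"
--
-- def RemoveCommonIndent(S):
--     NumberOfSpace = 0
--     if S[0] != SPACE:
--         return S
--     while S[NumberOfSpace] == SPACE:
--         NumberOfSpace += 1
--     prefix = NumberOfSpace * SPACE
--     lines = S[NumberOfSpace:].split(EOL)
--     out = []
--     for line in lines:
--         if line.startswith(prefix):
--             out.append(line[NumberOfSpace:])
--         else:
--             out.append(line)
--     return EOL.join(out)
-- ===== Notes on version B (the rewrite author's own statement) =====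
-- stated objective: alternative
-- what changed: B keeps A's guard and space-counting while loop but replaces the single global string replace of newline-plus-N-spaces by newline with an explicit split of the dedented string into lines, a per-line conditional strip of N leading spaces, and a join on newlines.
import Mathlib
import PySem

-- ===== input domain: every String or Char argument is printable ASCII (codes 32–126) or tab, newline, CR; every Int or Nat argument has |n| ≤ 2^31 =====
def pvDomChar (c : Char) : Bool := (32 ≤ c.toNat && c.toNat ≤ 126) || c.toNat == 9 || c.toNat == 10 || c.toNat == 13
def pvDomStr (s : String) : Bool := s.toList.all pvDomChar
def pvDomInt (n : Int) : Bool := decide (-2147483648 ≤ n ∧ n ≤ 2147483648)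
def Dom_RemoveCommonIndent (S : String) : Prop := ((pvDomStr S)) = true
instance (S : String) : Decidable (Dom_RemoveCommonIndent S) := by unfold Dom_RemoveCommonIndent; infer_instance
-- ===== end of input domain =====

-- B replaces A's single global str.replace("\n"+N*" ", "\n") by an explicit split on "\n",
-- a per-line conditional strip of N leading spaces, and a "\n".join — same cost, different pass shape.

-- ===== PORT A =====
-- the while loop 'while S[NumberOfSpace] == SPACE: NumberOfSpace += 1', ported as structural
-- recursion; exact whenever some character of S is not a space (Pre_), where Python's loop terminates.
-- Shared verbatim by both ports: B deliberately keeps A's guard and counting loop.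
def pvCountSpaces : List Char → Nat
  | [] => 0
  | c :: t => if c = ' ' then pvCountSpaces t + 1 else 0

def RemoveCommonIndent (S : String) : String :=
  let cs := S.toList
  match PySem.List.pyGet? cs 0 with
  | none => ""                   -- S[0] raises IndexError: outside Pre_
  | some c0 =>
    if c0 ≠ ' ' then S
    else
      let n := pvCountSpaces cs
      let s1 := PySem.Chars.slice cs (some (n : Int)) none            -- S[NumberOfSpace:]
      String.mk (PySem.Chars.replace s1 ('\n' :: List.replicate n ' ') ['\n'])  -- S.replace(EOL + n*SPACE, EOL)

-- ===== PORT B =====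
def RemoveCommonIndent_alt (S : String) : String :=
  let cs := S.toList
  match PySem.List.pyGet? cs 0 with
  | none => ""                   -- S[0] raises IndexError: outside Pre_
  | some c0 =>
    if c0 ≠ ' ' then S
    else
      let n := pvCountSpaces cs
      let pre := List.replicate n ' '                                  -- prefix = n*SPACE
      let lines := PySem.Chars.splitOn (PySem.Chars.slice cs (some (n : Int)) none) ['\n']  -- split(EOL), sep ≠ ""
      String.mk (PySem.Chars.join ['\n'] (lines.map (fun line =>
        if PySem.Chars.startswith line pre then PySem.Chars.slice line (some (n : Int)) none
        else line)))

-- ===== PRECONDITION & SPEC =====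
-- Pre_ excludes exactly the strings whose characters are all spaces (including ""): there A's
-- S[0] / the while loop raises IndexError (B keeps the same guard and loop and raises too).
def Pre_RemoveCommonIndent (S : String) : Prop := S.toList.any (fun c => c ≠ ' ') = true
instance (S : String) : Decidable (Pre_RemoveCommonIndent S) := by unfold Pre_RemoveCommonIndent; infer_instance
def pvWitness_RemoveCommonIndent : String := " a"
def Spec_RemoveCommonIndent (S : String) (out : String) : Prop := out = RemoveCommonIndent_alt S
instance (S : String) (out : String) : Decidable (Spec_RemoveCommonIndent S out) := by unfold Spec_RemoveCommonIndent; infer_instance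

-- ===== CLAIM (what is proved, stated in full; the proofs are below) =====
def Claim_equal_RemoveCommonIndent : Prop := ∀ (S : String), Dom_RemoveCommonIndent S → Pre_RemoveCommonIndent S → Spec_RemoveCommonIndent S (RemoveCommonIndent S)

-- ===== LEMMAS AND PROOFS =====

-- the pattern EOL + n*SPACE
def pvPat (n : Nat) : List Char := '\n' :: List.replicate n ' '

-- simple recursive model of str.replace(pat, "\n")
def pvRepl (n : Nat) : List Char → List Char
  | [] => []
  | c :: t =>
    if (pvPat n).isPrefixOf (c :: t) then '\n' :: pvRepl n (t.drop n)
    else c :: pvRepl n t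
termination_by l => l.length
decreasing_by all_goals simp

-- simple recursive model of split("\n")
def pvSplit : List Char → List (List Char)
  | [] => [[]]
  | c :: t =>
    if c = '\n' then [] :: pvSplit t
    else match pvSplit t with
      | [] => [[c]]        -- unreachable: pvSplit never returns []
      | h :: r => (c :: h) :: r

-- per-line action of B
def pvF (n : Nat) (line : List Char) : List Char :=
  if (List.replicate n ' ').isPrefixOf line then line.drop n else line

-- common shape of both sides after the first line
def pvTailJoin (n : Nat) : List Char → List Char
  | [] => []
  | c :: b => c :: (pvF n (b.takeWhile (· ≠ '\n')) ++ pvTailJoin n (b.dropWhile (· ≠ '\n')))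
termination_by l => l.length
decreasing_by
  have := List.length_dropWhile_le (p := fun x => decide (x ≠ '\n')) (l := b)
  simp at *; omega

theorem pvSplit_ne_nil (l : List Char) : pvSplit l ≠ [] := by
  induction l with
  | nil => simp [pvSplit]
  | cons c t ih =>
    simp only [pvSplit]
    split
    · simp
    · rcases h : pvSplit t with _ | ⟨h', r⟩ <;> simp

theorem pvReplace_go_eq (n : Nat) : ∀ (fuel : Nat) (l acc : List Char), l.length ≤ fuel →
    PySem.Chars.replace.go (pvPat n) ['\n'] fuel l acc = acc.reverse ++ pvRepl n l := by
  intro fuel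
  induction fuel with
  | zero =>
    intro l acc h
    have : l = [] := by cases l <;> simp_all
    subst this
    rw [PySem.Chars.replace.go]; simp [pvRepl]
  | succ fuel ih =>
    intro l acc h
    cases l with
    | nil => rw [PySem.Chars.replace.go]; simp [pvRepl]; omega
    | cons c t =>
      rw [PySem.Chars.replace.go]
      simp only [pvRepl]
      split
      · rename_i hp
        rw [ih]
        · simp [pvPat]
        · simp [pvPat] at *
          have := List.length_drop (l := t) (i := n)
          omega
      · rw [ih]
        · simp
        · simp at h; omega

theorem pvReplace_eq (n : Nat) (l : List Char) :
    PySem.Chars.replace l (pvPat n) ['\n'] = pvRepl n l := by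
  have h : ('\n' :: List.replicate n ' ') = pvPat n := rfl
  rw [PySem.Chars.replace]
  simp only [pvPat, List.isEmpty_cons, if_neg Bool.false_ne_true]
  rw [h, pvReplace_go_eq n l.length l [] (le_refl _)]
  simp

theorem pvSplitOn_go_eq : ∀ (fuel : Nat) (l cur : List Char) (acc : List (List Char)),
    l.length < fuel →
    PySem.Chars.splitOn.go ['\n'] fuel l cur acc =
      acc.reverse ++ (match pvSplit l with
        | [] => []
        | h :: r => (cur.reverse ++ h) :: r) := by
  intro fuel
  induction fuel with
  | zero => intro l cur acc h; omega
  | succ fuel ih =>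
    intro l cur acc h
    cases l with
    | nil => rw [PySem.Chars.splitOn.go]; simp [pvSplit]; omega
    | cons c t =>
      rw [PySem.Chars.splitOn.go]
      by_cases hc : c = '\n'
      · subst hc
        rw [if_pos (by simp [List.isPrefixOf])]
        rw [show List.drop ['\n'].length ('\n' :: t) = t from rfl]
        rw [ih t [] (cur.reverse :: acc) (by simp at h; omega)]
        rcases hs : pvSplit t with _ | ⟨h', r⟩
        · exact absurd hs (pvSplit_ne_nil t)
        · have : pvSplit ('\n' :: t) = [] :: h' :: r := by
            rw [pvSplit, if_pos rfl, hs]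
          rw [this]
          simp only [List.reverse_cons, List.append_assoc, List.nil_append, List.cons_append,
            List.reverse_nil, List.append_nil]
      · rw [if_neg (by
          show ¬ ((('\n' == c) && List.isPrefixOf [] t) = true)
          intro hcontr
          exact hc (beq_iff_eq.mp (Bool.and_eq_true_iff.mp hcontr).1).symm)]
        rw [ih t (c :: cur) acc (by simp at h; omega)]
        rcases hs : pvSplit t with _ | ⟨h', r⟩
        · exact absurd hs (pvSplit_ne_nil t)
        · have : pvSplit (c :: t) = (c :: h') :: r := by
            rw [pvSplit, if_neg hc, hs]
          rw [this]
          simp only [List.reverse_cons, List.append_assoc, List.nil_append, List.cons_append,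
            List.reverse_nil, List.append_nil]

theorem pvSplitOn_eq (l : List Char) : PySem.Chars.splitOn l ['\n'] = pvSplit l := by
  rw [PySem.Chars.splitOn]
  rw [pvSplitOn_go_eq (l.length + 1) l [] [] (by omega)]
  rcases hs : pvSplit l with _ | ⟨h, r⟩
  · exact absurd hs (pvSplit_ne_nil l)
  · simp

-- pvRepl copies newline-free text verbatim
theorem pvRepl_append (n : Nat) (a b : List Char) (ha : ∀ c ∈ a, c ≠ '\n') :
    pvRepl n (a ++ b) = a ++ pvRepl n b := by
  induction a with
  | nil => simp
  | cons c a' ih =>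
    have hc : c ≠ '\n' := ha c (by simp)
    simp only [List.cons_append, pvRepl]
    rw [if_neg (by
      show ¬ ((('\n' == c) && (List.replicate n ' ').isPrefixOf (a' ++ b)) = true)
      intro hcontr
      exact hc (beq_iff_eq.mp (Bool.and_eq_true_iff.mp hcontr).1).symm)]
    rw [ih (fun x hx => ha x (by simp [hx]))]

theorem pv_dropWhile_head : ∀ (l : List Char) (c : Char) (b : List Char),
    l.dropWhile (· ≠ '\n') = c :: b → c = '\n' := by
  intro l
  induction l with
  | nil => intro c b h; simp at h
  | cons a t ih =>
    intro c b h
    by_cases ha : a = '\n'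
    · subst ha
      rw [List.dropWhile_cons, if_neg (by simp)] at h
      exact (List.cons.injEq _ _ _ _ ▸ h).1.symm
    · rw [List.dropWhile_cons, if_pos (by simp [ha])] at h
      exact ih c b h

theorem pv_takeWhile_replicate (n : Nat) (b : List Char) :
    ((List.replicate n ' ') ++ b).takeWhile (· ≠ '\n') =
      List.replicate n ' ' ++ b.takeWhile (· ≠ '\n') := by
  induction n with
  | zero => simp
  | succ m ih => simp [List.replicate_succ, List.takeWhile_cons, ih]

theorem pv_dropWhile_replicate (n : Nat) (b : List Char) :
    ((List.replicate n ' ') ++ b).dropWhile (· ≠ '\n') = b.dropWhile (· ≠ '\n') := by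
  induction n with
  | zero => simp
  | succ m ih => simp [List.replicate_succ, List.dropWhile_cons, ih]


-- A's side: global replace, line by line
theorem pvRepl_eq_tailJoin (n : Nat) : ∀ (N : Nat) (l : List Char), l.length ≤ N →
    pvRepl n l = l.takeWhile (· ≠ '\n') ++ pvTailJoin n (l.dropWhile (· ≠ '\n')) := by
  intro N
  induction N with
  | zero =>
    intro l h
    have : l = [] := by cases l <;> simp_all
    subst this; simp [pvRepl, pvTailJoin]
  | succ N ih =>
    intro l h
    conv_lhs => rw [← List.takeWhile_append_dropWhile (p := fun x => decide (x ≠ '\n')) (l := l)]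
    rw [pvRepl_append n _ _ (by intro c hc; simpa using List.mem_takeWhile_imp hc)]
    rcases hd : l.dropWhile (· ≠ '\n') with _ | ⟨c, b⟩
    · simp [pvRepl, pvTailJoin]
    · have hc : c = '\n' := pv_dropWhile_head l c b hd
      subst hc
      have hlb : b.length + 1 ≤ l.length := by
        have := List.length_dropWhile_le (p := fun x => decide (x ≠ '\n')) (l := l)
        rw [hd] at this; simpa using this
      rw [pvTailJoin]
      by_cases hp : (List.replicate n ' ').isPrefixOf b
      · rw [pvRepl, if_pos (by simpa [pvPat, List.isPrefixOf_iff_prefix] using hp)]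
        obtain ⟨b', rfl⟩ : ∃ b', b = List.replicate n ' ' ++ b' :=
          (List.isPrefixOf_iff_prefix.mp hp).imp (fun b' hb' => hb'.symm)
        rw [ih ((List.replicate n ' ' ++ b').drop n) (by simp at *; omega)]
        simp only [List.drop_left' (List.length_replicate), pvF,
          pv_takeWhile_replicate, pv_dropWhile_replicate]
        rw [if_pos (by simp [List.isPrefixOf_iff_prefix, List.prefix_append])]
      · rw [pvRepl, if_neg (by simpa [pvPat, List.isPrefixOf_iff_prefix] using hp)]
        rw [ih b (by omega)]
        have hfn : pvF n (b.takeWhile (· ≠ '\n')) = b.takeWhile (· ≠ '\n') := by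
          rw [pvF, if_neg]
          intro hpre
          exact hp (List.isPrefixOf_iff_prefix.mpr
            ((List.isPrefixOf_iff_prefix.mp hpre).trans (List.takeWhile_prefix _)))
        rw [hfn]

-- split decomposes at the first newline
theorem pvSplit_decomp (l : List Char) :
    pvSplit l = l.takeWhile (· ≠ '\n') ::
      (match l.dropWhile (· ≠ '\n') with
        | [] => []
        | _ :: b => pvSplit b) := by
  induction l with
  | nil => simp [pvSplit]
  | cons c t ih =>
    by_cases hc : c = '\n'
    · subst hc
      rw [pvSplit, if_pos rfl, List.takeWhile_cons, if_neg (by simp),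
        List.dropWhile_cons, if_neg (by simp)]
    · rw [pvSplit, if_neg hc, List.takeWhile_cons, if_pos (by simp [hc]),
        List.dropWhile_cons, if_pos (by simp [hc]), ih]

-- B's side: join of the mapped split, line by line
theorem pvJoin_eq_tailJoin (n : Nat) : ∀ (N : Nat) (l : List Char), l.length ≤ N →
    PySem.Chars.join ['\n'] ((pvSplit l).map (pvF n)) =
      pvF n (l.takeWhile (· ≠ '\n')) ++ pvTailJoin n (l.dropWhile (· ≠ '\n')) := by
  intro N
  induction N with
  | zero =>
    intro l h
    have : l = [] := by cases l <;> simp_all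
    subst this
    simp [pvSplit, pvTailJoin, PySem.Chars.join, List.intercalate]
  | succ N ih =>
    intro l h
    rw [pvSplit_decomp]
    rcases hd : l.dropWhile (· ≠ '\n') with _ | ⟨c, b⟩
    · simp [PySem.Chars.join, List.intercalate, pvTailJoin]
    · have hc : c = '\n' := pv_dropWhile_head l c b hd
      subst hc
      have hlb : b.length + 1 ≤ l.length := by
        have := List.length_dropWhile_le (p := fun x => decide (x ≠ '\n')) (l := l)
        rw [hd] at this; simpa using this
      rcases hs : pvSplit b with _ | ⟨h', r⟩
      · exact absurd hs (pvSplit_ne_nil b)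
      · rw [show (match ('\n'::b : List Char) with
            | [] => ([] : List (List Char))
            | _ :: b => pvSplit b) = pvSplit b from rfl]
        rw [hs, List.map_cons, List.map_cons, PySem.Chars.join_cons_cons]
        rw [show pvF n h' :: List.map (pvF n) r = List.map (pvF n) (pvSplit b) from by
          rw [hs, List.map_cons]]
        rw [ih b (by omega)]
        rw [pvTailJoin]
        simp

theorem pvCountSpaces_head : ∀ (cs : List Char) (c : Char) (t : List Char),
    cs.drop (pvCountSpaces cs) = c :: t → c ≠ ' ' := by
  intro cs
  induction cs with
  | nil => intro c t h; simp at h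
  | cons a b ih =>
    intro c t h
    by_cases ha : a = ' '
    · subst ha
      rw [pvCountSpaces, if_pos rfl, List.drop_succ_cons] at h
      exact ih c t h
    · rw [pvCountSpaces, if_neg ha, List.drop_zero] at h
      exact (List.cons.injEq _ _ _ _ ▸ h).1 ▸ ha

theorem RemoveCommonIndent_spec : Claim_equal_RemoveCommonIndent := by
  intro S _ _
  unfold Spec_RemoveCommonIndent RemoveCommonIndent RemoveCommonIndent_alt
  rcases hS : S.toList with _ | ⟨c0, cs0⟩
  · simp [hS, PySem.List.pyGet?]
  · have hget : PySem.List.pyGet? (c0 :: cs0) 0 = some c0 := by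
      simp [PySem.List.pyGet?, PySem.List.pyIdx?]
    simp only [hS, hget]
    by_cases hc0 : c0 = ' '
    · rw [if_neg (fun h => h hc0), if_neg (fun h => h hc0)]
      have hslice : ∀ (l : List Char) (n : Nat),
          PySem.Chars.slice l (some (n : Int)) none = l.drop n := by
        intro l n; simp [PySem.List.slice_from]
      simp only [hslice]
      set n := pvCountSpaces (c0 :: cs0) with hn
      set l := (c0 :: cs0).drop n with hl
      rw [show ('\n' :: List.replicate n ' ') = pvPat n from rfl]
      rw [pvReplace_eq n l, pvSplitOn_eq]
      have hmap : (pvSplit l).map (fun line =>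
          if PySem.Chars.startswith line (List.replicate n ' ')
          then line.drop n else line) = (pvSplit l).map (pvF n) := by
        apply List.map_congr_left
        intro line _
        simp [PySem.Chars.startswith, pvF]
      rw [hmap]
      rw [pvRepl_eq_tailJoin n l.length l (le_refl _), pvJoin_eq_tailJoin n l.length l (le_refl _)]
      have hfn : pvF n (l.takeWhile (· ≠ '\n')) = l.takeWhile (· ≠ '\n') := by
        have hn1 : 1 ≤ n := by simp [hn, pvCountSpaces, hc0]
        rw [pvF, if_neg]
        intro hpre
        rcases ht : l.takeWhile (· ≠ '\n') with _ | ⟨a, b⟩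
        · rw [ht] at hpre
          rcases n with _ | m
          · omega
          · simp [List.replicate_succ] at hpre
        · have ha : a = ' ' := by
            rw [ht] at hpre
            rcases n with _ | m
            · omega
            · rw [List.replicate_succ] at hpre
              exact (beq_iff_eq.mp (Bool.and_eq_true_iff.mp hpre).1).symm
          have hhead : ∃ t', l = a :: t' := by
            have := List.takeWhile_prefix (p := fun x => decide (x ≠ '\n')) (l := l)
            rw [ht] at this
            rcases this with ⟨s, hs⟩
            exact ⟨b ++ s, by simpa using hs.symm⟩
          rcases hhead with ⟨t', ht'⟩
          exact pvCountSpaces_head (c0 :: cs0) a t' (by rw [← hl, ht']) ha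
      rw [hfn]
    · rw [if_pos hc0, if_pos hc0]
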